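-- pv_equiv track=rewrite | github.com/lychlov/compaign | 2019/train/0924-09-bye-5.py | bye_5
-- ===== SOURCE A (Python) =====
-- def bye_5(n):
--     circle = list(range(1, n + 1))
--     bye = 0
--     bye_count = 0
--     while bye_count < len(circle) - 1:
--         for i in range(len(circle)):
--             if circle[i] != 0:
--                 if bye == 5:
--                     bye = 1
--                 else:
--                     bye += 1
--                 if bye == 5:
--                     circle[i] = 0
--                     bye_count += 1
--     for i in circle:
--         if i != 0:
--             return i
-- ===== SOURCE B (Python) =====
-- def bye_5(n):
--     # Josephus recurrence with k = 5, O(n) instead of A's repeated-sweep simulation.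
--     j = 0
--     for m in range(2, n + 1):
--         j = (j + 5) % m
--     return j + 1
-- ===== Notes on version B (the rewrite author's own statement) =====
-- stated objective: faster
-- what changed: Replaces A's O(n^2) repeated-sweep elimination simulation (marking eliminated slots with 0 and rescanning) by the closed Josephus recurrence J(1)=0, J(m)=(J(m-1)+5) mod m, returning J(n)+1.
-- outside the precondition, e.g. on bye_5(0): A returns None, B returns 1; on bye_5(-3): A returns None, B returns 1
import Mathlib
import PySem

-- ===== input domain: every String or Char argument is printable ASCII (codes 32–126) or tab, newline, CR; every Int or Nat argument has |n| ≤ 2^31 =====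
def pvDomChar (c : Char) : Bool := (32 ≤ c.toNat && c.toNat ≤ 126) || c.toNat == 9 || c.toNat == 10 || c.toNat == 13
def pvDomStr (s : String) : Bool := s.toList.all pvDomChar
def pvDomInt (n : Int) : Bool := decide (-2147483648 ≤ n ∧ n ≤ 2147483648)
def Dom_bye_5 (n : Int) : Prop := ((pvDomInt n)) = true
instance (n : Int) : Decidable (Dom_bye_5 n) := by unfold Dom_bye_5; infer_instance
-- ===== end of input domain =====

-- B replaces A's repeated-sweep elimination simulation by the O(n) Josephus recurrence J(1)=0, J(m)=(J(m-1)+5) mod m.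

-- ===== PORT A =====
-- inner 'for i in range(len(circle))' pass: visits entries in order, skipping zeros,
-- carrying (bye, bye_count); a killed entry is overwritten with 0 (structural recursion over the same state)
def pvInnerAGo : List Int → List Int → Int → Int → (List Int × Int × Int)
  | [], acc, bye, cnt => (acc.reverse, bye, cnt)
  | x :: xs, acc, bye, cnt =>
    if x ≠ 0 then
      let bye1 := if bye = 5 then 1 else bye + 1
      if bye1 = 5 then pvInnerAGo xs (0 :: acc) bye1 (cnt + 1)
      else pvInnerAGo xs (x :: acc) bye1 cnt
    else pvInnerAGo xs (x :: acc) bye cnt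

def pvInnerA (l : List Int) (bye cnt : Int) : List Int × Int × Int :=
  pvInnerAGo l [] bye cnt

-- the 'while bye_count < len(circle) - 1' loop; fuel only totalizes the recursion
-- (the proof shows the fuel passed below always suffices)
def pvLoopA : Nat → List Int → Int → Int → List Int
  | 0, circle, _, _ => circle
  | fuel + 1, circle, bye, cnt =>
    if cnt < (circle.length : Int) - 1 then
      let r := pvInnerA circle bye cnt
      pvLoopA fuel r.1 r.2.1 r.2.2
    else circle

-- trailing 'for i in circle: if i != 0: return i' (fall-through, excluded by Pre_, gives 0)
def pvFirstNonzero : List Int → Int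
  | [] => 0
  | x :: xs => if x ≠ 0 then x else pvFirstNonzero xs

def bye_5 (n : Int) : Int :=
  let circle := PySem.List.pyRange 1 (n + 1) 1
  pvFirstNonzero (pvLoopA (5 * n + 6).toNat circle 0 0)

-- ===== PORT B =====
def bye_5_alt (n : Int) : Int :=
  (PySem.List.pyRange 2 (n + 1) 1).foldl (fun j m => PySem.Int.mod (j + 5) m) 0 + 1

-- ===== PRECONDITION & SPEC =====
-- Pre_ excludes n ≤ 0, where A's trailing loop falls through and returns None (not an int).
def Pre_bye_5 (n : Int) : Prop := 1 ≤ n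
instance (n : Int) : Decidable (Pre_bye_5 n) := by unfold Pre_bye_5; infer_instance
def pvWitness_bye_5 : Int := 6

def Spec_bye_5 (n : Int) (out : Int) : Prop := out = bye_5_alt n
instance (n : Int) (out : Int) : Decidable (Spec_bye_5 n out) := by unfold Spec_bye_5; infer_instance

-- ===== CLAIM (what is proved, stated in full; the proofs are below) =====
def Claim_equal_bye_5 : Prop := ∀ (n : Int), Dom_bye_5 n → Pre_bye_5 n → Spec_bye_5 n (bye_5 n)

-- ===== LEMMAS AND PROOFS =====

-- alive entries of the circle (Python's nonzero slots), in order
def pvAlive (l : List Int) : List Int := l.filter (fun x => x ≠ 0)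

-- one sweep on the compressed (zero-free) list: returns (survivors, new bye)
def pvPass : List Int → Int → (List Int × Int)
  | [], b => ([], b)
  | x :: xs, b =>
    let b1 := if b = 5 then 1 else b + 1
    if b1 = 5 then pvPass xs b1
    else
      let r := pvPass xs b1
      (x :: r.1, r.2)

-- bye-value normalised to a counter in [0,4] (bye = 5 means "just killed", i.e. 0 since the last kill)
def pvC (b : Int) : Nat := if b = 5 then 0 else b.toNat

-- one-visit-at-a-time circular machine: kill every 5th visited element, survivor returned
def pvMachine : List Int → Nat → Int
  | [], _ => 0
  | [x], _ => x
  | x :: y :: t, c =>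
    if (c + 1) % 5 = 0 then pvMachine (y :: t) 0
    else pvMachine ((y :: t) ++ [x]) (c + 1)
termination_by l c => 5 * l.length + (4 - c % 5)
decreasing_by
  · simp; omega
  · simp; omega

-- the Josephus recurrence (k = 5), 0-indexed survivor
def pvJs : Nat → Nat
  | 0 => 0
  | 1 => 0
  | m + 2 => (pvJs (m + 1) + 5) % (m + 2)

def pvRng (m : Nat) : List Int := (List.range m).map Int.ofNat

def pvM (l : List Int) (b : Int) : Nat := 5 * l.length + (4 - pvC b)


lemma pvC_le4 (b : Int) (h0 : 0 ≤ b) (h5 : b ≤ 5) : pvC b ≤ 4 := by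
  unfold pvC; split_ifs <;> omega

lemma pvC_step (b : Int) (h0 : 0 ≤ b) (h5 : b ≤ 5) :
    pvC (if b = 5 then 1 else b + 1) = (pvC b + 1) % 5 := by
  unfold pvC; split_ifs <;> omega

lemma pvC_kill (b : Int) (h0 : 0 ≤ b) (h5 : b ≤ 5) :
    ((if b = 5 then 1 else b + 1) = 5 ↔ pvC b = 4) := by
  unfold pvC; split_ifs with h1
  · exact ⟨fun h => absurd h (by decide), fun h => h.elim⟩
  · constructor <;> intro h <;> omega

lemma pvB1_bounds (b : Int) (h0 : 0 ≤ b) (h5 : b ≤ 5) :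
    0 ≤ (if b = 5 then 1 else b + 1) ∧ (if b = 5 then 1 else b + 1) ≤ 5 := by
  split_ifs <;> omega


-- structural (non-accumulator) version of the inner pass, used only by the proofs
def pvInnerAS : List Int → Int → Int → (List Int × Int × Int)
  | [], bye, cnt => ([], bye, cnt)
  | x :: xs, bye, cnt =>
    if x ≠ 0 then
      let bye1 := if bye = 5 then 1 else bye + 1
      if bye1 = 5 then
        let r := pvInnerAS xs bye1 (cnt + 1)
        (0 :: r.1, r.2)
      else
        let r := pvInnerAS xs bye1 cnt
        (x :: r.1, r.2)
    else
      let r := pvInnerAS xs bye cnt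
      (x :: r.1, r.2)

lemma pvInnerAGo_eq (l : List Int) : ∀ (acc : List Int) (b k : Int),
    pvInnerAGo l acc b k
      = (acc.reverse ++ (pvInnerAS l b k).1, (pvInnerAS l b k).2) := by
  induction l with
  | nil => intro acc b k; simp [pvInnerAGo, pvInnerAS]
  | cons x xs ih =>
    intro acc b k
    by_cases hx : x = 0
    · simp [pvInnerAGo, pvInnerAS, hx, ih]
    · by_cases hb1 : (if b = 5 then 1 else b + 1) = 5 <;>
        simp [pvInnerAGo, pvInnerAS, hx, hb1, ih]

lemma pvInnerA_eq (l : List Int) (b k : Int) : pvInnerA l b k = pvInnerAS l b k := by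
  rw [pvInnerA, pvInnerAGo_eq]
  simp

lemma pvInnerAS_spec (l : List Int) (b k : Int) :
    (pvInnerAS l b k).1.length = l.length ∧
    pvAlive (pvInnerAS l b k).1 = (pvPass (pvAlive l) b).1 ∧
    (pvInnerAS l b k).2.1 = (pvPass (pvAlive l) b).2 ∧
    (pvInnerAS l b k).2.2 = k + ((pvAlive l).length : Int) - ((pvPass (pvAlive l) b).1.length : Int) := by
  induction l generalizing b k with
  | nil => simp [pvInnerAS, pvAlive, pvPass]
  | cons x xs ih =>
    by_cases hx : x = 0
    · subst hx
      simpa [pvInnerAS, pvAlive] using ih b k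
    · by_cases hb1 : (if b = 5 then 1 else b + 1) = 5
      · have h := ih (if b = 5 then 1 else b + 1) (k + 1)
        simp [pvInnerAS, pvAlive, pvPass, hx, hb1] at h ⊢
        refine ⟨h.1, h.2.1, h.2.2.1, ?_⟩
        rw [h.2.2.2]; ring
      · have h := ih (if b = 5 then 1 else b + 1) k
        simp [pvInnerAS, pvAlive, pvPass, hx, hb1] at h ⊢
        refine ⟨h.1, h.2.1, h.2.2.1, ?_⟩
        rw [h.2.2.2]; ring

lemma pvInnerA_spec (l : List Int) (b k : Int) :
    (pvInnerA l b k).1.length = l.length ∧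
    pvAlive (pvInnerA l b k).1 = (pvPass (pvAlive l) b).1 ∧
    (pvInnerA l b k).2.1 = (pvPass (pvAlive l) b).2 ∧
    (pvInnerA l b k).2.2 = k + ((pvAlive l).length : Int) - ((pvPass (pvAlive l) b).1.length : Int) := by
  rw [pvInnerA_eq]
  exact pvInnerAS_spec l b k

lemma pvPass_inv (l : List Int) (b : Int) (h0 : 0 ≤ b) (h5 : b ≤ 5) :
    0 ≤ (pvPass l b).2 ∧ (pvPass l b).2 ≤ 5 := by
  induction l generalizing b with
  | nil => simpa [pvPass] using ⟨h0, h5⟩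
  | cons x xs ih =>
    obtain ⟨g0, g5⟩ := pvB1_bounds b h0 h5
    by_cases hb1 : (if b = 5 then 1 else b + 1) = 5 <;>
      simpa [pvPass, hb1] using ih _ g0 g5

lemma pvPass_ne_nil (l : List Int) (b : Int) (h0 : 0 ≤ b) (h5 : b ≤ 5)
    (h : 2 ≤ l.length ∨ (l ≠ [] ∧ pvC b ≠ 4)) : (pvPass l b).1 ≠ [] := by
  induction l generalizing b with
  | nil => simp at h
  | cons x xs ih =>
    obtain ⟨g0, g5⟩ := pvB1_bounds b h0 h5
    by_cases hb1 : (if b = 5 then 1 else b + 1) = 5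
    · -- x killed: bye was 4, so by h the list has length ≥ 2, xs ≠ []
      have hc : pvC b = 4 := (pvC_kill b h0 h5).mp hb1
      have hxs : xs ≠ [] := by
        rcases h with h | ⟨_, h4⟩
        · simp at h; exact List.ne_nil_of_length_pos (by omega)
        · exact absurd hc h4
      simpa [pvPass, hb1] using ih _ g0 g5 (Or.inr ⟨hxs, by rw [hb1]; simp [pvC]⟩)
    · simp [pvPass, hb1]

lemma pvPass_len_le (l : List Int) (b : Int) : (pvPass l b).1.length ≤ l.length := by
  induction l generalizing b with
  | nil => simp [pvPass]
  | cons x xs ih =>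
    by_cases hb1 : (if b = 5 then 1 else b + 1) = 5 <;>
      · simp only [pvPass, hb1, if_pos, ite_false, List.length_cons]
        first
        | exact le_trans (ih _) (by omega)
        | simpa using ih _

lemma pvPass_measure (l : List Int) (b : Int) (h0 : 0 ≤ b) (h5 : b ≤ 5) (hl : l ≠ []) :
    pvM (pvPass l b).1 (pvPass l b).2 < pvM l b := by
  induction l generalizing b with
  | nil => simp at hl
  | cons x xs ih =>
    obtain ⟨g0, g5⟩ := pvB1_bounds b h0 h5
    have hstep := pvC_step b h0 h5
    have hle4 := pvC_le4 b h0 h5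
    by_cases hxs : xs = []
    · subst hxs
      by_cases hb1 : (if b = 5 then 1 else b + 1) = 5
      · have hc : pvC b = 4 := (pvC_kill b h0 h5).mp hb1
        simp only [pvPass, hb1, if_pos, pvM, pvC, List.length_cons, List.length_nil]
        split_ifs <;> omega
      · have hc : pvC b ≠ 4 := fun hh => hb1 ((pvC_kill b h0 h5).mpr hh)
        have h4 := pvC_le4 _ g0 g5
        simp only [pvPass, hb1, ite_false, pvM, List.length_cons, List.length_nil]
        omega
    · have ihx := ih _ g0 g5 hxs
      by_cases hb1 : (if b = 5 then 1 else b + 1) = 5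
      · have hc : pvC b = 4 := (pvC_kill b h0 h5).mp hb1
        have hlen := pvPass_len_le xs (if b = 5 then 1 else b + 1)
        simp only [pvPass, hb1, if_pos, pvM, List.length_cons] at *
        omega
      · have hc : pvC b ≠ 4 := fun hh => hb1 ((pvC_kill b h0 h5).mpr hh)
        simp only [pvPass, hb1, ite_false, pvM, List.length_cons] at *
        omega

lemma pvMachine_pass (l : List Int) (b : Int) : ∀ (acc : List Int), 0 ≤ b → b ≤ 5 →
    (2 ≤ (l ++ acc).length ∨ pvC b ≠ 4) →
    pvMachine (l ++ acc) (pvC b) = pvMachine (acc ++ (pvPass l b).1) (pvC (pvPass l b).2) := by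
  induction l generalizing b with
  | nil => intro acc _ _ _; simp [pvPass]
  | cons x xs ih =>
    intro acc h0 h5 h
    obtain ⟨g0, g5⟩ := pvB1_bounds b h0 h5
    have hle4 := pvC_le4 b h0 h5
    by_cases hb1 : (if b = 5 then 1 else b + 1) = 5
    · have hc : pvC b = 4 := (pvC_kill b h0 h5).mp hb1
      have hne : xs ++ acc ≠ [] := by
        intro hnil
        rcases h with h | h
        · rw [List.cons_append, hnil] at h; simp at h
        · exact h hc
      obtain ⟨y, t, e⟩ := List.exists_cons_of_ne_nil hne
      have hml : pvMachine ((x :: xs) ++ acc) (pvC b) = pvMachine (xs ++ acc) 0 := by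
        rw [List.cons_append, e, hc]; simp [pvMachine]
      have hps : pvPass (x :: xs) b = pvPass xs 5 := by
        simp only [pvPass, hb1, if_pos]
      rw [hml, hps]
      have h5' := ih 5 acc (by decide) (by decide) (Or.inr (by simp [pvC]))
      simpa [pvC] using h5' 
    · have hc : pvC b ≠ 4 := fun hh => hb1 ((pvC_kill b h0 h5).mpr hh)
      have hstep : pvC (if b = 5 then 1 else b + 1) = pvC b + 1 := by
        rw [pvC_step b h0 h5]; omega
      by_cases he : xs ++ acc = []
      · obtain ⟨hxs, hacc⟩ := List.append_eq_nil_iff.mp he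
        subst hxs; subst hacc
        simp [pvPass, hb1, pvMachine]
      · obtain ⟨y, t, e⟩ := List.exists_cons_of_ne_nil he
        have hmod : (pvC b + 1) % 5 ≠ 0 := by omega
        have hml : pvMachine ((x :: xs) ++ acc) (pvC b)
            = pvMachine (xs ++ (acc ++ [x])) (pvC b + 1) := by
          rw [List.cons_append, e, ← List.append_assoc, e]
          simp [pvMachine, hmod]
        have hlen : 2 ≤ (xs ++ (acc ++ [x])).length := by
          have : 1 ≤ (xs ++ acc).length := by rw [e]; simp
          simp at this ⊢; omega
        have hih := ih _ (acc ++ [x]) g0 g5 (Or.inl hlen)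
        rw [hstep] at hih
        have hps : pvPass (x :: xs) b
            = (x :: (pvPass xs (if b = 5 then 1 else b + 1)).1,
               (pvPass xs (if b = 5 then 1 else b + 1)).2) := by
          simp only [pvPass, hb1, ite_false]
        rw [hml, hih, hps]
        simp [List.append_assoc]

lemma pvLoopA_spec (fuel : Nat) : ∀ (circle : List Int) (b k : Int), 0 ≤ b → b ≤ 5 →
    1 ≤ (pvAlive circle).length →
    k = (circle.length : Int) - ((pvAlive circle).length : Int) →
    pvM (pvAlive circle) b ≤ fuel →
    pvAlive (pvLoopA fuel circle b k) = [pvMachine (pvAlive circle) (pvC b)] := by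
  induction fuel with
  | zero =>
    intro circle b k h0 h5 h1 hk hM
    exfalso; unfold pvM at hM; omega
  | succ fuel ih =>
    intro circle b k h0 h5 h1 hk hM
    have hlen_le : (pvAlive circle).length ≤ circle.length := List.length_filter_le _ _
    by_cases h2 : 2 ≤ (pvAlive circle).length
    · have hcond : k < (circle.length : Int) - 1 := by omega
      simp only [pvLoopA, if_pos hcond]
      obtain ⟨e1, e2, e3, e4⟩ := pvInnerA_spec circle b k
      obtain ⟨p0, p5⟩ := pvPass_inv (pvAlive circle) b h0 h5
      have hne := pvPass_ne_nil (pvAlive circle) b h0 h5 (Or.inl h2)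
      have hms := pvPass_measure (pvAlive circle) b h0 h5
        (by intro hnil; rw [hnil] at h2; simp at h2)
      have hrec := ih (pvInnerA circle b k).1 (pvInnerA circle b k).2.1 (pvInnerA circle b k).2.2
        (by rw [e3]; exact p0) (by rw [e3]; exact p5)
        (by rw [e2]; exact List.length_pos_iff.mpr hne)
        (by rw [e4, e1, e2, hk]; ring)
        (by rw [e2, e3]; omega)
      rw [hrec, e2, e3]
      have hmp := pvMachine_pass (pvAlive circle) b [] h0 h5 (Or.inl (by simpa using h2))
      simp only [List.append_nil, List.nil_append] at hmp
      rw [hmp]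
    · have hone : (pvAlive circle).length = 1 := by omega
      have hcond : ¬ (k < (circle.length : Int) - 1) := by omega
      simp only [pvLoopA, if_neg hcond]
      obtain ⟨v, hv⟩ := List.length_eq_one_iff.mp hone
      rw [hv]; simp [pvMachine]

lemma pvMachine_map (f : Int → Int) : ∀ (l : List Int) (c : Nat), l ≠ [] →
    pvMachine (l.map f) c = f (pvMachine l c) := by
  intro l c
  induction l, c using pvMachine.induct with
  | case1 c => intro h; exact absurd rfl h
  | case2 x c => intro _; simp [pvMachine]
  | case3 x y t c hcond ih =>
    intro _
    simp only [List.map_cons, pvMachine, if_pos hcond]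
    exact ih (by simp)
  | case4 x y t c hcond ih =>
    intro _
    simp only [List.map_cons, pvMachine, if_neg hcond]
    simpa [List.map_append] using ih (by simp)

lemma pvMachine_rot (l : List Int) (c : Nat) (hl : 2 ≤ l.length) (hc : ¬ (c + 1) % 5 = 0) :
    pvMachine l c = pvMachine (l.rotate 1) (c + 1) := by
  match l, hl with
  | x :: y :: t, _ =>
    have hr : (x :: y :: t).rotate 1 = (y :: t) ++ [x] := by
      simp [List.rotate_cons_succ]
    rw [hr]; simp [pvMachine, hc]

lemma pvMachine_kill (l : List Int) (hl : 2 ≤ l.length) :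
    pvMachine l 4 = pvMachine l.tail 0 := by
  match l, hl with
  | x :: y :: t, _ => simp [pvMachine]

lemma pvMachine_five (l : List Int) (hl : 2 ≤ l.length) :
    pvMachine l 0 = pvMachine ((l.rotate 4).tail) 0 := by
  have l1 : (l.rotate 1).length = l.length := List.length_rotate ..
  have l2 : ((l.rotate 1).rotate 1).length = l.length := by rw [List.length_rotate, l1]
  have l3 : (((l.rotate 1).rotate 1).rotate 1).length = l.length := by rw [List.length_rotate, l2]
  rw [pvMachine_rot l 0 hl (by decide),
      pvMachine_rot _ 1 (by omega) (by decide),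
      pvMachine_rot _ 2 (by omega) (by decide),
      pvMachine_rot _ 3 (by omega) (by decide),
      pvMachine_kill _ (by simp [List.length_rotate]; omega)]
  simp [List.rotate_rotate]

lemma pvRng_rot (m : Nat) (_hm : 2 ≤ m) :
    ((pvRng m).rotate 4).tail = (pvRng (m - 1)).map (fun i => (i + 5) % (m : Int)) := by
  apply List.ext_getElem
  · simp [pvRng]
  · intro i h1 h2
    rw [List.getElem_tail, List.getElem_rotate]
    unfold pvRng
    simp only [List.getElem_map, List.getElem_range, List.length_map, List.length_range]
    rw [show Int.ofNat ((i + 1 + 4) % m) = (((i + 1 + 4) % m : Nat) : Int) from rfl,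
        Int.natCast_mod]
    push_cast [Int.ofNat_eq_natCast]
    ring_nf

lemma pvMachine_rng (m : Nat) (hm : 1 ≤ m) : pvMachine (pvRng m) 0 = (pvJs m : Int) := by
  obtain ⟨m, rfl⟩ : ∃ k, m = k + 1 := ⟨m - 1, by omega⟩
  clear hm
  induction m with
  | zero => simp [pvRng, pvJs, List.range_one, pvMachine]
  | succ m ih =>
    have hlen : 2 ≤ (pvRng (m + 2)).length := by simp [pvRng]
    rw [pvMachine_five _ hlen, pvRng_rot (m + 2) (by omega)]
    rw [show m + 2 - 1 = m + 1 by omega]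
    rw [pvMachine_map _ _ _ (by simp [pvRng]), ih]
    show ((pvJs (m + 1) : Int) + 5) % ((m + 2 : Nat) : Int) = (pvJs (m + 2) : Int)
    rw [show pvJs (m + 2) = (pvJs (m + 1) + 5) % (m + 2) from rfl, Int.natCast_mod]
    push_cast
    ring_nf

lemma pvAlt_js (m : Nat) (hm : 1 ≤ m) :
    (PySem.List.pyRange 2 ((m : Int) + 1) 1).foldl (fun j k => PySem.Int.mod (j + 5) k) 0
      = (pvJs m : Int) := by
  obtain ⟨m, rfl⟩ : ∃ k, m = k + 1 := ⟨m - 1, by omega⟩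
  clear hm
  induction m with
  | zero =>
    rw [show (((0 + 1 : Nat) : Int) + 1) = 2 by norm_num, PySem.List.pyRange_one_eq_nil (by norm_num)]
    simp [pvJs]
  | succ m ih =>
    have hb : (((m + 1 + 1 : Nat) : Int) + 1) = (((m + 1 : Nat) : Int) + 1) + 1 := by
      push_cast; ring
    rw [hb, PySem.List.pyRange_one_succ_right (by push_cast; omega), List.foldl_append, ih]
    show PySem.Int.mod ((pvJs (m + 1) : Int) + 5) (((m + 1 : Nat) : Int) + 1) = _
    rw [PySem.Int.mod_eq_emod_of_pos (by push_cast; omega)]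
    rw [show pvJs (m + 2) = (pvJs (m + 1) + 5) % (m + 2) from rfl, Int.natCast_mod]
    push_cast
    ring_nf

lemma pvFirstNonzero_eq (l : List Int) : pvFirstNonzero l = (pvAlive l).headD 0 := by
  induction l with
  | nil => simp [pvFirstNonzero, pvAlive]
  | cons x xs ih => by_cases hx : x = 0 <;> simp [pvFirstNonzero, pvAlive, hx, ih]

-- ===== VERDICT (by name: the statement is the Claim_ definition above) =====
theorem bye_5_spec : Claim_equal_bye_5 := by
  intro n _ hpre
  have hn : 1 ≤ n := hpre
  have hnN : ((n.toNat : Int)) = n := Int.toNat_of_nonneg (by omega)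
  have hN1 : 1 ≤ n.toNat := by omega
  unfold Spec_bye_5 bye_5 bye_5_alt
  simp only []
  have hcirc : PySem.List.pyRange 1 (n + 1) 1 = (pvRng n.toNat).map (fun i => i + 1) := by
    rw [PySem.List.pyRange_one, show (n + 1 - 1).toNat = n.toNat by omega]
    unfold pvRng
    rw [List.map_map]
    exact List.map_congr_left fun x _ => by simp [Int.ofNat_eq_natCast, add_comm]
  have halive : pvAlive (PySem.List.pyRange 1 (n + 1) 1) = PySem.List.pyRange 1 (n + 1) 1 := by
    apply List.filter_eq_self.mpr
    intro x hx
    have := PySem.List.mem_pyRange_one.mp hx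
    simp only [decide_eq_true_eq]
    omega
  have hlen : (PySem.List.pyRange 1 (n + 1) 1).length = n.toNat := by
    rw [PySem.List.length_pyRange_one]; omega
  have halN : (pvAlive (PySem.List.pyRange 1 (n + 1) 1)).length = n.toNat := by
    rw [halive, hlen]
  have hloop := pvLoopA_spec (5 * n + 6).toNat (PySem.List.pyRange 1 (n + 1) 1) 0 0
    (by norm_num) (by norm_num)
    (by rw [halN]; omega)
    (by rw [halN, hlen]; ring)
    (by unfold pvM; rw [halN, show pvC 0 = 0 from rfl]; omega)
  rw [pvFirstNonzero_eq, hloop, halive]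
  simp only [List.headD_cons]
  rw [show pvC 0 = 0 from rfl, hcirc,
      pvMachine_map (fun i => i + 1) (pvRng n.toNat) 0
        (by unfold pvRng; simp; omega),
      pvMachine_rng n.toNat hN1,
      show n + 1 = ((n.toNat : Int)) + 1 by omega,
      pvAlt_js n.toNat hN1]
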